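-- pv_equiv track=rewrite | github.com/rghpkp/actgrader-streamlit | static/grader/score_report_templates/factory_template_ACT.py | populate_row
-- ===== SOURCE A (Python) =====
-- def populate_row(sid, num_questions, space_breaks, row_breaks):
--     """
--     Builds html table row for ACT sections. Each 'row' consists of 3 <tr></tr> tags,
--     and each of the 3 <tr> contains the same number of <td> {{{{var}}}} </td> tags.
--     Each <td> contains a Jinja-compliant variable.
--
--     (string) sid: the section id - will be prepended to each var name in each section
--                     ex: Reading section: rQ23, rSA23, rCA23
--
--     (int) num_questions:
--
--     (tuple)(int) space_breaks: contains question indices after which to insert blank <td> - used to format results by passage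
--
--     (tuple)(int) row_breaks: question indices after which to start a new row - for formatting
--
--     return (string) m: the html markup for a complete ACT section
--     """
--
--     m = "" # init a string to hold the html markup
--     rq = '<tr class="question_nums"><td class="row_label">Question</td><td>&nbsp</td> {} </tr>'  # table row of question numbers
--     rs = '<tr class="submitted_answers"><td class="row_label">Submitted</td><td>&nbsp</td> {} </tr>'  # table row of submitted answers
--     rc = '<tr class="correct_answers"><td class="row_label">Correct</td><td>&nbsp</td> {} </tr>'  # table row of correct answers
--
--     tdq = ""  # table division - question number
--     tds = ""  # table division - submitted answer
--     tdc = ""  # table division - correct answer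
--
--     q = 1  # question index counter
--     while q <= num_questions:
--
--         # for each questions index, create corresponding variables for q, sa, ca
--         tdq += f"<td> {{{{ {sid}Q{q} }}}} </td>"
--         tds += f"<td> {{{{ {sid}SA{q} }}}} </td>"
--         tdc += f"<td> {{{{ {sid}CA{q} }}}} </td>"
--
--         if q in space_breaks: # if at end of passage, insert <td> spacers
--             tdq += "<td>&nbsp</td>"
--             tds += "<td>&nbsp</td>"
--             tdc += "<td>&nbsp</td>"
--
--         if q in row_breaks:  # if time to start a new row
--             # insert all the <td> into the corresponding <tr> and append to markup
--             m += ("\n            " + rq.format(tdq))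
--             m += ("\n            " + rs.format(tds))
--             m += ("\n            " + rc.format(tdc))
--
--             # insert blank row
--             m += ('\n            <tr class="blank"><td>&nbsp</td></tr>')
--
--             # reset the temp td strings
--             tdq = ""
--             tds = ""
--             tdc = ""
--
--         q += 1
--
--     # when loop concludes, insert all the (remaining) <td> into the corresponding <tr>
--     # and append to markup
--     m += ("\n            " + rq.format(tdq))
--     m += ("\n            " + rs.format(tds))
--     m += ("\n            " + rc.format(tdc))
--
--     return m
-- ===== SOURCE B (Python) =====
-- def populate_row(sid, num_questions, space_breaks, row_breaks):
--     # Partition the questions into row groups first, then render each group.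
--     groups = []
--     cur = []
--     for q in range(1, num_questions + 1):
--         cur.append(q)
--         if q in row_breaks:
--             groups.append(cur)
--             cur = []
--     groups.append(cur)  # trailing (possibly empty) group
--
--     def cells(kind, g):
--         parts = []
--         for q in g:
--             parts.append(f"<td> {{{{ {sid}{kind}{q} }}}} </td>")
--             if q in space_breaks:
--                 parts.append("<td>&nbsp</td>")
--         return "".join(parts)
--
--     blocks = []
--     for g in groups:
--         blocks.append(f'\n            <tr class="question_nums"><td class="row_label">Question</td><td>&nbsp</td> {cells("Q", g)} </tr>')
--         blocks.append(f'\n            <tr class="submitted_answers"><td class="row_label">Submitted</td><td>&nbsp</td> {cells("SA", g)} </tr>')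
--         blocks.append(f'\n            <tr class="correct_answers"><td class="row_label">Correct</td><td>&nbsp</td> {cells("CA", g)} </tr>')
--         blocks.append('\n            <tr class="blank"><td>&nbsp</td></tr>')
--     return "".join(blocks[:-1])  # every group emits a blank row; drop the trailing one
-- ===== Notes on version B (the rewrite author's own statement) =====
-- stated objective: alternative
-- what changed: B first partitions the questions into row groups (with one trailing, possibly empty, group), renders each group's three rows plus a blank row as a list of blocks, and joins all blocks except the trailing blank, instead of A's single while-loop that interleaves cell accumulation with flush-and-reset of mutable td strings.
import Mathlib
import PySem

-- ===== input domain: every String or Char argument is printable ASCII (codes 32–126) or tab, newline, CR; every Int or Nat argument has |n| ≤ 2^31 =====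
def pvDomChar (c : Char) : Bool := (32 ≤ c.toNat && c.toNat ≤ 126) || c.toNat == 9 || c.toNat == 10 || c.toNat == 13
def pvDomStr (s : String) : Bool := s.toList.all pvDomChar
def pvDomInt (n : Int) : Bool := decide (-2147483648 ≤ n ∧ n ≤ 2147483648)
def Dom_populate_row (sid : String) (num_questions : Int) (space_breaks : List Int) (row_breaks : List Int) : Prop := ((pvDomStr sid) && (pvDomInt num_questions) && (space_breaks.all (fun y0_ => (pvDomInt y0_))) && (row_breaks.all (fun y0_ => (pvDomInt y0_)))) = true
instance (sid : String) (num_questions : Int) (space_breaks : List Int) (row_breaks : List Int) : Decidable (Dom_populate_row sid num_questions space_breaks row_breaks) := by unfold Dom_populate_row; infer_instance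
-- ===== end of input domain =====

-- B partitions the questions into row groups up front and renders each group, instead of
-- A's single while-loop with flush-and-reset accumulator state (objective: alternative decomposition).

-- ===== PORT A =====
-- row templates rq/rs/rc, applied via .format(td)
def pvRqFmt (t : String) : String := "<tr class=\"question_nums\"><td class=\"row_label\">Question</td><td>&nbsp</td> " ++ t ++ " </tr>"
def pvRsFmt (t : String) : String := "<tr class=\"submitted_answers\"><td class=\"row_label\">Submitted</td><td>&nbsp</td> " ++ t ++ " </tr>"
def pvRcFmt (t : String) : String := "<tr class=\"correct_answers\"><td class=\"row_label\">Correct</td><td>&nbsp</td> " ++ t ++ " </tr>"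

-- one iteration of A's while loop, state (m, tdq, tds, tdc)
def pvStepA (sid : String) (space_breaks row_breaks : List Int)
    (st : String × String × String × String) (q : Int) : String × String × String × String :=
  match st with
  | (m, tdq, tds, tdc) =>
    let tdq := tdq ++ "<td> {{ " ++ sid ++ "Q" ++ PySem.Int.toStr q ++ " }} </td>"
    let tds := tds ++ "<td> {{ " ++ sid ++ "SA" ++ PySem.Int.toStr q ++ " }} </td>"
    let tdc := tdc ++ "<td> {{ " ++ sid ++ "CA" ++ PySem.Int.toStr q ++ " }} </td>"
    let tdq := if q ∈ space_breaks then tdq ++ "<td>&nbsp</td>" else tdq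
    let tds := if q ∈ space_breaks then tds ++ "<td>&nbsp</td>" else tds
    let tdc := if q ∈ space_breaks then tdc ++ "<td>&nbsp</td>" else tdc
    if q ∈ row_breaks then
      (m ++ ("\n            " ++ pvRqFmt tdq)
         ++ ("\n            " ++ pvRsFmt tds)
         ++ ("\n            " ++ pvRcFmt tdc)
         ++ "\n            <tr class=\"blank\"><td>&nbsp</td></tr>", "", "", "")
    else (m, tdq, tds, tdc)

def populate_row (sid : String) (num_questions : Int) (space_breaks : List Int) (row_breaks : List Int) : String :=
  -- while q <= num_questions with q starting at 1 ≡ fold over range(1, num_questions+1)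
  let st := (PySem.List.pyRange 1 (num_questions + 1) 1).foldl (pvStepA sid space_breaks row_breaks) ("", "", "", "")
  st.1 ++ ("\n            " ++ pvRqFmt st.2.1)
       ++ ("\n            " ++ pvRsFmt st.2.2.1)
       ++ ("\n            " ++ pvRcFmt st.2.2.2)

-- ===== PORT B =====
-- cells(kind, g): the <td> parts of one group, joined
def pvCellsB (sid kind : String) (space_breaks : List Int) (g : List Int) : String :=
  String.join (g.foldl (fun parts q =>
    let parts := parts ++ ["<td> {{ " ++ sid ++ kind ++ PySem.Int.toStr q ++ " }} </td>"]
    if q ∈ space_breaks then parts ++ ["<td>&nbsp</td>"] else parts) [])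

-- the four block strings one group contributes
def pvBlocksB (sid : String) (space_breaks : List Int) (blocks : List String) (g : List Int) : List String :=
  blocks ++ ["\n            <tr class=\"question_nums\"><td class=\"row_label\">Question</td><td>&nbsp</td> " ++ pvCellsB sid "Q" space_breaks g ++ " </tr>",
             "\n            <tr class=\"submitted_answers\"><td class=\"row_label\">Submitted</td><td>&nbsp</td> " ++ pvCellsB sid "SA" space_breaks g ++ " </tr>",
             "\n            <tr class=\"correct_answers\"><td class=\"row_label\">Correct</td><td>&nbsp</td> " ++ pvCellsB sid "CA" space_breaks g ++ " </tr>",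
             "\n            <tr class=\"blank\"><td>&nbsp</td></tr>"]

-- the grouping loop: state (groups, cur)
def pvGroupStepB (row_breaks : List Int) (st : List (List Int) × List Int) (q : Int) :
    List (List Int) × List Int :=
  match st with
  | (groups, cur) =>
    let cur := cur ++ [q]
    if q ∈ row_breaks then (groups ++ [cur], []) else (groups, cur)

def populate_row_alt (sid : String) (num_questions : Int) (space_breaks : List Int) (row_breaks : List Int) : String :=
  let st := (PySem.List.pyRange 1 (num_questions + 1) 1).foldl (pvGroupStepB row_breaks) ([], [])
  let groups := st.1 ++ [st.2]
  let blocks := groups.foldl (pvBlocksB sid space_breaks) []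
  String.join (PySem.List.slice blocks none (some (-1)))   -- blocks[:-1]

-- ===== PRECONDITION & SPEC =====
def Spec_populate_row (sid : String) (num_questions : Int) (space_breaks : List Int) (row_breaks : List Int) (out : String) : Prop := out = populate_row_alt sid num_questions space_breaks row_breaks
instance (sid : String) (num_questions : Int) (space_breaks : List Int) (row_breaks : List Int) (out : String) : Decidable (Spec_populate_row sid num_questions space_breaks row_breaks out) := by unfold Spec_populate_row; infer_instance

-- ===== CLAIM (what is proved, stated in full; the proofs are below) =====
def Claim_equal_populate_row : Prop := ∀ (sid : String) (num_questions : Int) (space_breaks : List Int) (row_breaks : List Int), Dom_populate_row sid num_questions space_breaks row_breaks → Spec_populate_row sid num_questions space_breaks row_breaks (populate_row sid num_questions space_breaks row_breaks)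

-- ===== LEMMAS AND PROOFS =====

-- the three rows one group of cell strings renders to (with their "\n            " prefixes)
def pvRows (tq ts tc : String) : String :=
  ("\n            " ++ pvRqFmt tq) ++ ("\n            " ++ pvRsFmt ts) ++ ("\n            " ++ pvRcFmt tc)

def pvBlank : String := "\n            <tr class=\"blank\"><td>&nbsp</td></tr>"

-- the common reference rendering both ports are reduced to
def pvR (sid : String) (sb rb : List Int) : List Int → String × String × String → String
  | [], (tq, ts, tc) => pvRows tq ts tc
  | q :: qs, (tq, ts, tc) =>
    let tq := tq ++ "<td> {{ " ++ sid ++ "Q" ++ PySem.Int.toStr q ++ " }} </td>"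
    let ts := ts ++ "<td> {{ " ++ sid ++ "SA" ++ PySem.Int.toStr q ++ " }} </td>"
    let tc := tc ++ "<td> {{ " ++ sid ++ "CA" ++ PySem.Int.toStr q ++ " }} </td>"
    let tq := if q ∈ sb then tq ++ "<td>&nbsp</td>" else tq
    let ts := if q ∈ sb then ts ++ "<td>&nbsp</td>" else ts
    let tc := if q ∈ sb then tc ++ "<td>&nbsp</td>" else tc
    if q ∈ rb then pvRows tq ts tc ++ pvBlank ++ pvR sid sb rb qs ("", "", "")
    else pvR sid sb rb qs (tq, ts, tc)

theorem pvJoin_concat (xs : List String) (a : String) :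
    String.join (xs ++ [a]) = String.join xs ++ a := by
  simp [String.join, List.foldl_append]

theorem pvJoin_concat2 (xs : List String) (a b : String) :
    String.join (xs ++ [a, b]) = String.join xs ++ a ++ b := by
  rw [show xs ++ [a, b] = (xs ++ [a]) ++ [b] by simp, pvJoin_concat, pvJoin_concat]

-- A's fold, then the final flush, equals the reference rendering
theorem pvA_eq_R (sid : String) (sb rb : List Int) (qs : List Int) :
    ∀ m tq ts tc,
      (qs.foldl (pvStepA sid sb rb) (m, tq, ts, tc)).1
        ++ ("\n            " ++ pvRqFmt (qs.foldl (pvStepA sid sb rb) (m, tq, ts, tc)).2.1)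
        ++ ("\n            " ++ pvRsFmt (qs.foldl (pvStepA sid sb rb) (m, tq, ts, tc)).2.2.1)
        ++ ("\n            " ++ pvRcFmt (qs.foldl (pvStepA sid sb rb) (m, tq, ts, tc)).2.2.2)
      = m ++ pvR sid sb rb qs (tq, ts, tc) := by
  induction qs with
  | nil => intro m tq ts tc; simp [pvR, pvRows, String.append_assoc]
  | cons q qs ih =>
    intro m tq ts tc
    simp only [List.foldl_cons, pvStepA]
    by_cases hrb : q ∈ rb <;> by_cases hsb : q ∈ sb <;>
      simp only [hrb, hsb, if_true, if_false] <;>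
      rw [ih] <;>
      simp [pvR, hrb, hsb, pvRows, pvBlank, String.append_assoc]

-- B's cells of a group, extended by one question
theorem pvCellsB_concat (sid kind : String) (sb : List Int) (g : List Int) (q : Int) :
    pvCellsB sid kind sb (g ++ [q]) =
      (if q ∈ sb then
        pvCellsB sid kind sb g ++ ("<td> {{ " ++ sid ++ kind ++ PySem.Int.toStr q ++ " }} </td>") ++ "<td>&nbsp</td>"
       else pvCellsB sid kind sb g ++ ("<td> {{ " ++ sid ++ kind ++ PySem.Int.toStr q ++ " }} </td>")) := by
  unfold pvCellsB
  rw [List.foldl_append]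
  generalize (g.foldl _ ([] : List String)) = parts
  by_cases hsb : q ∈ sb <;>
    simp [hsb, pvJoin_concat, pvJoin_concat2, String.append_assoc]

theorem pvCellsB_nil (sid kind : String) (sb : List Int) : pvCellsB sid kind sb [] = "" := by
  simp [pvCellsB, String.join]

-- pvBlocksB folded over groups ++ [g] appends g's four blocks
theorem pvBlocksB_fold_concat (sid : String) (sb : List Int) (gs : List (List Int)) (g : List Int) :
    (gs ++ [g]).foldl (pvBlocksB sid sb) [] = gs.foldl (pvBlocksB sid sb) [] ++
      ["\n            <tr class=\"question_nums\"><td class=\"row_label\">Question</td><td>&nbsp</td> " ++ pvCellsB sid "Q" sb g ++ " </tr>",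
       "\n            <tr class=\"submitted_answers\"><td class=\"row_label\">Submitted</td><td>&nbsp</td> " ++ pvCellsB sid "SA" sb g ++ " </tr>",
       "\n            <tr class=\"correct_answers\"><td class=\"row_label\">Correct</td><td>&nbsp</td> " ++ pvCellsB sid "CA" sb g ++ " </tr>",
       "\n            <tr class=\"blank\"><td>&nbsp</td></tr>"] := by
  rw [List.foldl_append]
  rfl

-- B's block literals equal A's prefix ++ template shapes
theorem pvRowQ_merge (t : String) :
    ("\n            <tr class=\"question_nums\"><td class=\"row_label\">Question</td><td>&nbsp</td> " ++ t ++ " </tr>")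
      = "\n            " ++ pvRqFmt t := by
  unfold pvRqFmt; rw [← String.append_assoc, ← String.append_assoc]; rfl
theorem pvRowS_merge (t : String) :
    ("\n            <tr class=\"submitted_answers\"><td class=\"row_label\">Submitted</td><td>&nbsp</td> " ++ t ++ " </tr>")
      = "\n            " ++ pvRsFmt t := by
  unfold pvRsFmt; rw [← String.append_assoc, ← String.append_assoc]; rfl
theorem pvRowC_merge (t : String) :
    ("\n            <tr class=\"correct_answers\"><td class=\"row_label\">Correct</td><td>&nbsp</td> " ++ t ++ " </tr>")
      = "\n            " ++ pvRcFmt t := by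
  unfold pvRcFmt; rw [← String.append_assoc, ← String.append_assoc]; rfl

-- joining all blocks of gs ++ [g] except the trailing blank
theorem pvJoinDrop (sid : String) (sb : List Int) (gs : List (List Int)) (g : List Int) :
    String.join (((gs ++ [g]).foldl (pvBlocksB sid sb) []).dropLast)
      = String.join (gs.foldl (pvBlocksB sid sb) [])
        ++ pvRows (pvCellsB sid "Q" sb g) (pvCellsB sid "SA" sb g) (pvCellsB sid "CA" sb g) := by
  rw [pvBlocksB_fold_concat]
  rw [show ∀ (a b c d : String) (xs : List String), xs ++ [a,b,c,d] = ((xs ++ [a]) ++ [b] ++ [c]) ++ [d] by intros; simp,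
      List.dropLast_concat]
  rw [pvJoin_concat, pvJoin_concat, pvJoin_concat]
  rw [pvRowQ_merge, pvRowS_merge, pvRowC_merge]
  simp [pvRows, String.append_assoc]

-- joining the four blocks one group appends (blank kept)
theorem pvJoin_pvBlocksB (sid : String) (sb : List Int) (bs : List String) (g : List Int) :
    String.join (pvBlocksB sid sb bs g)
      = String.join bs
        ++ pvRows (pvCellsB sid "Q" sb g) (pvCellsB sid "SA" sb g) (pvCellsB sid "CA" sb g)
        ++ pvBlank := by
  unfold pvBlocksB
  rw [show ∀ (a b c d : String) (xs : List String), xs ++ [a,b,c,d] = (((xs ++ [a]) ++ [b]) ++ [c]) ++ [d] by intros; simp]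
  rw [pvJoin_concat, pvJoin_concat, pvJoin_concat, pvJoin_concat]
  rw [pvRowQ_merge, pvRowS_merge, pvRowC_merge]
  simp [pvRows, pvBlank, String.append_assoc]

-- B's grouping fold, rendered, equals the reference rendering
theorem pvB_eq_R (sid : String) (sb rb : List Int) (qs : List Int) :
    ∀ (gs : List (List Int)) (cur : List Int),
      String.join ((((qs.foldl (pvGroupStepB rb) (gs, cur)).1 ++ [(qs.foldl (pvGroupStepB rb) (gs, cur)).2]).foldl (pvBlocksB sid sb) []).dropLast)
             = String.join (gs.foldl (pvBlocksB sid sb) [])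
        ++ pvR sid sb rb qs (pvCellsB sid "Q" sb cur, pvCellsB sid "SA" sb cur, pvCellsB sid "CA" sb cur) := by
  induction qs with
  | nil => intro gs cur; simpa [pvR] using pvJoinDrop sid sb gs cur
  | cons q qs ih =>
    intro gs cur
    simp only [List.foldl_cons, pvGroupStepB]
    by_cases hrb : q ∈ rb <;> by_cases hsb : q ∈ sb <;>
      simp only [hrb, if_true, if_false] <;>
      rw [ih] <;>
      simp [pvR, hrb, hsb, pvCellsB_concat, pvCellsB_nil, pvJoin_pvBlocksB, pvRows, pvBlank,
        String.append_assoc]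

-- ===== VERDICT (by name: the statement is the Claim_ definition above) =====
theorem populate_row_spec : Claim_equal_populate_row := by
  intro sid n sb rb _
  show populate_row sid n sb rb = populate_row_alt sid n sb rb
  simp only [populate_row, populate_row_alt, PySem.List.slice_to_neg_one]
  rw [pvA_eq_R, pvB_eq_R]
  simp [pvCellsB_nil, String.join]
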